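-- pv_equiv track=rewrite | github.com/deontaljaard/coding-problems | codewars/py/sq_in_rect.py | sqInRect
-- ===== SOURCE A (Python) =====
-- def sqInRect(lng, wdth):
--     if lng == wdth:
--         return None
--
--     squares = []
--     while wdth > 0:
--         cnt = int(lng / wdth)
--         rem = lng % wdth
--         for i in range(0, cnt):
--             squares.append(wdth)
--         lng = wdth
--         wdth = rem
--     return squares
-- ===== SOURCE B (Python) =====
-- def _squares(l, w):
--     if w <= 0:
--         return []
--     return [w] * (l // w) + _squares(w, l % w)
--
-- def sqInRect(lng, wdth):
--     if lng == wdth: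
--         return None
--     return _squares(lng, wdth)
-- ===== Notes on version B (the rewrite author's own statement) =====
-- stated objective: simpler
-- what changed: Replaces the while-loop with an accumulator list and inner append loop by a direct recursion on the Euclidean remainder sequence that builds each run with list replication and concatenation.
import Mathlib
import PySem

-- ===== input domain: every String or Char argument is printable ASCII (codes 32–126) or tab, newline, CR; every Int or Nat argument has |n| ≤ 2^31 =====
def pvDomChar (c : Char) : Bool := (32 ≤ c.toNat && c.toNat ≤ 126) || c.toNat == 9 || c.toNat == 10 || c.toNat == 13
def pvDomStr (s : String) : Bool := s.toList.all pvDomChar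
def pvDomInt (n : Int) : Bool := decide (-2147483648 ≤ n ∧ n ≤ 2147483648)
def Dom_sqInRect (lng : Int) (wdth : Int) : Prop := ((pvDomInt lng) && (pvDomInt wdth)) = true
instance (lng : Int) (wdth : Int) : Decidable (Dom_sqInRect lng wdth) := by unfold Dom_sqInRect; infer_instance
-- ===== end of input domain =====

-- B replaces A's while-loop with accumulator and inner append loop by a direct
-- recursion on the Euclidean remainder sequence using list replication (objective: simpler).


-- ===== PORT A =====
-- the while loop; 'int(lng / wdth)' is truncating division, exact on |n| ≤ 2^31
-- (the float quotient's rounding error is < 1/wdth there), ported as Int.tdiv.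
def sqInRectLoop (lng : Int) (wdth : Int) (squares : List Int) : List Int :=
  if h : 0 < wdth then
    let cnt := lng.tdiv wdth
    let rem := PySem.Int.mod lng wdth
    -- for i in range(0, cnt): squares.append(wdth)
    sqInRectLoop wdth rem ((PySem.List.pyRange 0 cnt 1).foldl (fun acc _ => acc ++ [wdth]) squares)
  else squares
termination_by wdth.toNat
decreasing_by
  have hw : 0 < wdth := h
  rw [PySem.Int.mod_eq_emod_of_pos hw]
  have h1 := Int.emod_nonneg lng (by omega : wdth ≠ 0)
  have h2 := Int.emod_lt_of_pos lng hw
  omega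

def sqInRect (lng : Int) (wdth : Int) : Option (List Int) :=
  if lng = wdth then none
  else some (sqInRectLoop lng wdth [])

-- ===== PORT B =====
-- recursion on the remainder sequence; Python '[w] * n' is [] for n ≤ 0,
-- which Int.toNat's clamping reproduces exactly.
def squaresRec (l : Int) (w : Int) : List Int :=
  if h : w ≤ 0 then []
  else List.replicate (PySem.Int.floordiv l w).toNat w ++ squaresRec w (PySem.Int.mod l w)
termination_by w.toNat
decreasing_by
  have hw : 0 < w := by omega
  rw [PySem.Int.mod_eq_emod_of_pos hw]
  have h1 := Int.emod_nonneg l (by omega : w ≠ 0)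
  have h2 := Int.emod_lt_of_pos l hw
  omega

def sqInRect_alt (lng : Int) (wdth : Int) : Option (List Int) :=
  if lng = wdth then none
  else some (squaresRec lng wdth)

-- ===== PRECONDITION & SPEC =====
def Spec_sqInRect (lng : Int) (wdth : Int) (out : Option (List Int)) : Prop := out = sqInRect_alt lng wdth
instance (lng : Int) (wdth : Int) (out : Option (List Int)) : Decidable (Spec_sqInRect lng wdth out) := by unfold Spec_sqInRect; infer_instance

-- ===== CLAIM (what is proved, stated in full; the proofs are below) =====
def Claim_equal_sqInRect : Prop := ∀ (lng : Int) (wdth : Int), Dom_sqInRect lng wdth → Spec_sqInRect lng wdth (sqInRect lng wdth)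

-- ===== LEMMAS AND PROOFS =====

-- folding an append over any list just appends that many copies
theorem foldl_append_const {α β : Type} (x : α) :
    ∀ (L : List β) (s : List α), L.foldl (fun acc _ => acc ++ [x]) s = s ++ List.replicate L.length x := by
  intro L
  induction L with
  | nil => intro s; simp
  | cons b t ih => intro s; simp [List.foldl, ih, List.replicate_succ, List.append_assoc]

-- for a positive divisor, the clamped truncating and flooring quotients agree
theorem toNat_tdiv_eq_toNat_floordiv (l w : Int) (hw : 0 < w) :
    (l.tdiv w).toNat = (PySem.Int.floordiv l w).toNat := by
  rw [PySem.Int.floordiv_eq_ediv_of_pos hw]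
  by_cases hl : 0 ≤ l
  · rw [Int.tdiv_eq_ediv_of_nonneg hl]
  · have hneg : l < 0 := by omega
    have h1 : l.tdiv w ≤ 0 := by
      have : 0 ≤ (-l).tdiv w := Int.tdiv_nonneg (by omega) (by omega)
      have hne : (-l).tdiv w = -(l.tdiv w) := Int.neg_tdiv l w ▸ rfl
      omega
    have h2 : l / w < 0 := by
      by_contra hge
      rw [not_lt] at hge
      have hprod : 0 ≤ w * (l / w) := mul_nonneg (le_of_lt hw) hge
      have heq := Int.mul_ediv_add_emod l w
      have hm := Int.emod_nonneg l (by omega : w ≠ 0)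
      linarith
    omega

theorem loop_eq_rec : ∀ (n : Nat) (l w : Int) (s : List Int), w.toNat ≤ n →
    sqInRectLoop l w s = s ++ squaresRec l w := by
  intro n
  induction n with
  | zero =>
    intro l w s hn
    rw [sqInRectLoop.eq_def, squaresRec.eq_def]
    have hw : ¬ 0 < w := by omega
    simp [hw, (by omega : w ≤ 0)]
  | succ n ih =>
    intro l w s hn
    rw [sqInRectLoop.eq_def, squaresRec.eq_def]
    by_cases hw : 0 < w
    · have hle : ¬ w ≤ 0 := by omega
      simp only [dif_pos hw, dif_neg hle]
      have hrem : (PySem.Int.mod l w).toNat ≤ n := by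
        rw [PySem.Int.mod_eq_emod_of_pos hw]
        have h1 := Int.emod_nonneg l (by omega : w ≠ 0)
        have h2 := Int.emod_lt_of_pos l hw
        omega
      rw [ih w (PySem.Int.mod l w) _ hrem]
      rw [foldl_append_const, PySem.List.length_pyRange_one]
      rw [(by omega : l.tdiv w - 0 = l.tdiv w), toNat_tdiv_eq_toNat_floordiv l w hw]
      simp [List.append_assoc]
    · simp [hw, (by omega : w ≤ 0)]

-- ===== VERDICT (by name: the statement is the Claim_ definition above) =====
theorem sqInRect_spec : Claim_equal_sqInRect := by
  intro lng wdth _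
  unfold Spec_sqInRect sqInRect sqInRect_alt
  by_cases h : lng = wdth
  · simp [h]
  · simp only [h, if_neg, not_false_iff]
    rw [loop_eq_rec wdth.toNat lng wdth [] le_rfl]
    simp
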